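-- pv_equiv track=rewrite | github.com/THEGREATCJPark/signal-ai | systems/generic-source-grounded-memory-current-best-20260413/retrieval_variant_harness/evaluate_generic_memory_retrieval_variants.py | exact_query_ids_from_tokens
-- ===== SOURCE A (Python) =====
-- EXACT_ID_PREFIXES = ("vis_", "src_", "obs_", "prob_", "lmeta_", "gmeta_")
--
-- def exact_query_ids_from_tokens(tokens: list[str]) -> list[str]:
--     return unique_preserve_order(
--         [
--             token
--             for token in tokens
--             if any(token.startswith(prefix) for prefix in EXACT_ID_PREFIXES)
--         ]
--     )
--
-- def unique_preserve_order(values: list[str]) -> list[str]: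
--     seen: set[str] = set()
--     result: list[str] = []
--     for value in values:
--         if value and value not in seen:
--             seen.add(value)
--             result.append(value)
--     return result
-- ===== SOURCE B (Python) =====
-- EXACT_ID_PREFIXES = ("vis_", "src_", "obs_", "prob_", "lmeta_", "gmeta_")
--
-- def exact_query_ids_from_tokens(tokens: list[str]) -> list[str]:
--     first: dict[str, int] = {}
--     for i, token in enumerate(tokens):
--         if token not in first:
--             first[token] = i
--     return [
--         token
--         for i, token in enumerate(tokens)
--         if first[token] == i
--         and any(token.startswith(prefix) for prefix in EXACT_ID_PREFIXES)
--     ]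
-- ===== Notes on version B (the rewrite author's own statement) =====
-- stated objective: alternative
-- what changed: Replaces A's filter-comprehension-then-seen-set-dedupe with a first-occurrence index: one pass builds a dict mapping each token to the position of its first occurrence, then a single comprehension keeps a token iff it sits at its first-occurrence position and carries one of the id prefixes, so no seen set and no result accumulator exist.
import Mathlib
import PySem

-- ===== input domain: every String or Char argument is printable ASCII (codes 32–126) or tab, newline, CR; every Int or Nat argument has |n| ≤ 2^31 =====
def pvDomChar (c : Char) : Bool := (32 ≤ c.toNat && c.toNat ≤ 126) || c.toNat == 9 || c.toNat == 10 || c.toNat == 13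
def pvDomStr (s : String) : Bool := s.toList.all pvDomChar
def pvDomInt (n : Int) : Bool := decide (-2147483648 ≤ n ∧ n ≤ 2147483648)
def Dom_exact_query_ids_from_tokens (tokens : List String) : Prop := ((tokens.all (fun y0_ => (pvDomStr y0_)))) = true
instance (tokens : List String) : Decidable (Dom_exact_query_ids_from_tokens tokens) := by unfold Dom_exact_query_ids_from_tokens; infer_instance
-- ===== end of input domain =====

-- B replaces A's filter-then-seen-set-dedupe with a first-occurrence index (dict built in one pass,
-- then one comprehension keeps each matching token exactly at its first position); same return value.
-- ===== PORT A =====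
def EXACT_ID_PREFIXES : List String := ["vis_", "src_", "obs_", "prob_", "lmeta_", "gmeta_"]

def unique_preserve_order (values : List String) : List String :=
  (values.foldl
    (fun (st : PySem.Set String × List String) value =>
      if value ≠ "" ∧ PySem.Set.contains st.1 value ≠ true then
        (PySem.Set.add st.1 value, st.2 ++ [value])
      else st)
    (PySem.Set.empty, [])).2

def exact_query_ids_from_tokens (tokens : List String) : List String :=
  unique_preserve_order
    (tokens.filter (fun token => EXACT_ID_PREFIXES.any (fun p => PySem.Str.startswith token p)))

-- ===== PORT B =====
-- first: dict token -> index of its first occurrence ('if token not in first: first[token] = i')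
def pvFirstOcc (tokens : List String) : PySem.Dict String Int :=
  (PySem.List.enumerate tokens 0).foldl
    (fun first p =>
      if PySem.Dict.contains first p.2 = false then PySem.Dict.insert first p.2 p.1 else first)
    PySem.Dict.empty

def exact_query_ids_from_tokens_alt (tokens : List String) : List String :=
  ((PySem.List.enumerate tokens 0).filter
      (fun p => (PySem.Dict.get? (pvFirstOcc tokens) p.2 == some p.1)
        && EXACT_ID_PREFIXES.any (fun pfx => PySem.Str.startswith p.2 pfx))).map
    (fun p => p.2)

-- ===== PRECONDITION & SPEC =====
def Spec_exact_query_ids_from_tokens (tokens : List String) (out : List String) : Prop := out = exact_query_ids_from_tokens_alt tokens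
instance (tokens : List String) (out : List String) : Decidable (Spec_exact_query_ids_from_tokens tokens out) := by unfold Spec_exact_query_ids_from_tokens; infer_instance

-- ===== CLAIM (what is proved, stated in full; the proofs are below) =====
def Claim_equal_exact_query_ids_from_tokens : Prop := ∀ (tokens : List String), Dom_exact_query_ids_from_tokens tokens → Spec_exact_query_ids_from_tokens tokens (exact_query_ids_from_tokens tokens)

-- ===== LEMMAS AND PROOFS =====

-- common reference point of the two proofs: keep a token iff it matches and was not seen before
def pvGo (pre : List String) : List String → List String
  | [] => []
  | t :: ts =>
    if t ∉ pre ∧ (EXACT_ID_PREFIXES.any fun q => PySem.Str.startswith t q) = true then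
      t :: pvGo (pre ++ [t]) ts
    else pvGo (pre ++ [t]) ts

-- a token matching one of the (non-empty) prefixes is non-empty
theorem matched_ne_empty (t : String)
    (h : EXACT_ID_PREFIXES.any (fun p => PySem.Str.startswith t p) = true) : t ≠ "" := by
  intro he; subst he; revert h; decide

-- A's dedupe loop over the filtered list equals the fused loop over tokens, for any state
theorem fused_eq (tokens : List String) (st : PySem.Set String × List String) :
    tokens.foldl
      (fun (st : PySem.Set String × List String) token =>
        if EXACT_ID_PREFIXES.any (fun p => PySem.Str.startswith token p)
            ∧ PySem.Set.contains st.1 token ≠ true then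
          (PySem.Set.add st.1 token, st.2 ++ [token])
        else st)
      st
    = (tokens.filter (fun token => EXACT_ID_PREFIXES.any (fun p => PySem.Str.startswith token p))).foldl
      (fun (st : PySem.Set String × List String) value =>
        if value ≠ "" ∧ PySem.Set.contains st.1 value ≠ true then
          (PySem.Set.add st.1 value, st.2 ++ [value])
        else st)
      st := by
  induction tokens generalizing st with
  | nil => rfl
  | cons t ts ih =>
    rw [List.foldl_cons, List.filter_cons]
    by_cases hm : (EXACT_ID_PREFIXES.any fun p => PySem.Str.startswith t p) = true
    · have hne := matched_ne_empty t hm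
      rw [if_pos hm, List.foldl_cons]
      by_cases hc : PySem.Set.contains st.1 t = true
      · rw [if_neg (fun h => h.2 hc), if_neg (fun h => h.2 hc), ih]
      · rw [if_pos ⟨hm, hc⟩, if_pos ⟨hne, hc⟩, ih]
    · rw [if_neg (fun h => hm h.1), if_neg (by simpa using hm), ih]

-- the fused loop computes pvGo, under the invariant "seen = matching tokens already passed"
theorem fused_to_go (xs : List String) :
    ∀ (S : PySem.Set String) (acc pre : List String),
    (∀ v, PySem.Set.contains S v = true ↔
      (v ∈ pre ∧ (EXACT_ID_PREFIXES.any fun q => PySem.Str.startswith v q) = true)) →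
    (xs.foldl
      (fun (st : PySem.Set String × List String) token =>
        if EXACT_ID_PREFIXES.any (fun p => PySem.Str.startswith token p)
            ∧ PySem.Set.contains st.1 token ≠ true then
          (PySem.Set.add st.1 token, st.2 ++ [token])
        else st)
      (S, acc)).2 = acc ++ pvGo pre xs := by
  induction xs with
  | nil => intro S acc pre _; simp [pvGo]
  | cons t ts ih =>
    intro S acc pre hinv
    rw [List.foldl_cons]
    by_cases hm : (EXACT_ID_PREFIXES.any fun q => PySem.Str.startswith t q) = true
    · by_cases hp : t ∈ pre
      · have hc : PySem.Set.contains S t = true := (hinv t).mpr ⟨hp, hm⟩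
        rw [if_neg (fun h => h.2 hc)]
        have : pvGo pre (t :: ts) = pvGo (pre ++ [t]) ts := by
          simp only [pvGo]; rw [if_neg (fun h => h.1 hp)]
        rw [this]
        exact ih S acc (pre ++ [t]) (by
          intro v
          rw [hinv v]
          constructor
          · rintro ⟨hv, hq⟩; exact ⟨by simp [hv], hq⟩
          · rintro ⟨hv, hq⟩
            rcases List.mem_append.mp hv with h | h
            · exact ⟨h, hq⟩
            · simp at h; subst h; exact ⟨hp, hq⟩)
      · have hc : ¬ PySem.Set.contains S t = true := fun h => hp ((hinv t).mp h).1
        rw [if_pos ⟨hm, hc⟩]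
        have hgo : pvGo pre (t :: ts) = t :: pvGo (pre ++ [t]) ts := by
          simp only [pvGo]; rw [if_pos ⟨hp, hm⟩]
        rw [hgo]
        have := ih (PySem.Set.add S t) (acc ++ [t]) (pre ++ [t]) (by
          intro v
          rw [show (PySem.Set.contains (PySem.Set.add S t) v = true) ↔
              (PySem.Set.contains S v = true ∨ v = t) by
            rw [PySem.Set.contains_iff, PySem.Set.mem_add, PySem.Set.contains_iff]]
          rw [hinv v]
          constructor
          · rintro (⟨hv, hq⟩ | hv)
            · exact ⟨by simp [hv], hq⟩
            · subst hv; exact ⟨by simp, hm⟩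
          · rintro ⟨hv, hq⟩
            rcases List.mem_append.mp hv with h | h
            · exact Or.inl ⟨h, hq⟩
            · simp at h; exact Or.inr h)
        rw [this, List.append_assoc, List.singleton_append]
    · rw [if_neg (fun h => hm h.1)]
      have : pvGo pre (t :: ts) = pvGo (pre ++ [t]) ts := by
        simp only [pvGo]
        rw [if_neg (fun h => hm h.2)]
      rw [this]
      exact ih S acc (pre ++ [t]) (by
        intro v
        rw [hinv v]
        constructor
        · rintro ⟨hv, hq⟩; exact ⟨by simp [hv], hq⟩
        · rintro ⟨hv, hq⟩
          rcases List.mem_append.mp hv with h | h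
          · exact ⟨h, hq⟩
          · simp at h; subst h; exact absurd hq hm)

-- B's first-occurrence dict: lookup = position of the first occurrence, offset by the start index
theorem firstOcc_loop (xs : List String) :
    ∀ (s : Int) (d : PySem.Dict String Int) (t : String),
    PySem.Dict.get? ((PySem.List.enumerate xs s).foldl
      (fun first p =>
        if PySem.Dict.contains first p.2 = false then PySem.Dict.insert first p.2 p.1 else first)
      d) t
    = (PySem.Dict.get? d t).orElse
        (fun _ => (PySem.List.index? xs t).map (fun n => (n : Int) + s)) := by
  induction xs with
  | nil =>
    intro s d t
    cases h : PySem.Dict.get? d t <;>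
      simp [PySem.List.enumerate_nil, PySem.List.index?_eq_idxOf?, h, Option.orElse]
  | cons x xs ih =>
    intro s d t
    rw [PySem.List.enumerate_cons, List.foldl_cons]
    by_cases hxt : x = t
    · subst hxt
      by_cases hc : PySem.Dict.contains d x = false
      · have hdn : PySem.Dict.get? d x = none :=
          (PySem.Dict.get?_eq_none_iff_contains d x).mpr hc
        rw [if_pos hc, ih, PySem.Dict.get?_insert_self, hdn,
          PySem.List.index?_cons_self]
        simp [Option.orElse]
      · have hct : PySem.Dict.contains d x = true := by
          cases h : PySem.Dict.contains d x
          · exact absurd h hc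
          · rfl
        have hds : PySem.Dict.get? d x ≠ none := fun h =>
          by rw [(PySem.Dict.get?_eq_none_iff_contains d x).mp h] at hct; exact Bool.false_ne_true hct
        obtain ⟨v, hv⟩ := Option.ne_none_iff_exists'.mp hds
        rw [if_neg (by simp [hc]), ih, hv]
        simp [Option.orElse]
    · have hd' : PySem.Dict.get?
          (if PySem.Dict.contains d x = false then PySem.Dict.insert d x s else d) t
          = PySem.Dict.get? d t := by
        split
        · exact PySem.Dict.get?_insert_of_ne d s (Ne.symm hxt)
        · rfl
      rw [ih, hd', PySem.List.index?_cons_of_ne xs hxt]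
      cases h : PySem.Dict.get? d t <;> cases hi : PySem.List.index? xs t <;>
        simp [Option.orElse]
      ring
theorem get?_pvFirstOcc (tokens : List String) (t : String) :
    PySem.Dict.get? (pvFirstOcc tokens) t
      = (PySem.List.index? tokens t).map (fun n => (n : Int)) := by
  unfold pvFirstOcc
  rw [firstOcc_loop, PySem.Dict.get?_empty]
  cases h : PySem.List.index? tokens t <;> simp [Option.orElse]

-- B's comprehension (first-occurrence test over the full token list) computes pvGo
theorem enumFilter_to_go (xs : List String) :
    ∀ (pre : List String),
    (((PySem.List.enumerate xs (pre.length : Int)).filter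
        (fun p => ((PySem.List.index? (pre ++ xs) p.2).map (fun n => (n : Int)) == some p.1)
          && EXACT_ID_PREFIXES.any (fun pfx => PySem.Str.startswith p.2 pfx))).map
      (fun p => p.2))
    = pvGo pre xs := by
  induction xs with
  | nil => intro pre; simp [PySem.List.enumerate_nil, pvGo]
  | cons t ts ih =>
    intro pre
    rw [PySem.List.enumerate_cons, List.filter_cons]
    have htail := ih (pre ++ [t])
    simp only [List.append_assoc, List.singleton_append, List.length_append,
      List.length_cons, List.length_nil, Nat.zero_add, Nat.cast_add, Nat.cast_one] at htail
    by_cases hp : t ∈ pre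
    · obtain ⟨k, hk⟩ : ∃ k, PySem.List.index? pre t = some k :=
        Option.isSome_iff_exists.mp ((PySem.List.index?_isSome_iff pre t).mpr hp)
      obtain ⟨hklt, -, -⟩ := PySem.List.getElem_of_index?_eq_some hk
      have hidx : PySem.List.index? (pre ++ t :: ts) t = some k := by
        rw [PySem.List.index?_append_of_mem _ hp, hk]
      rw [show ((((PySem.List.index? (pre ++ t :: ts) t).map (fun n => (n : Int)) ==
            some ((pre.length : Int)))
            && EXACT_ID_PREFIXES.any (fun pfx => PySem.Str.startswith t pfx)) = false) by
        rw [hidx]; simp; omega]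
      rw [if_neg (by decide)]
      have hgo : pvGo pre (t :: ts) = pvGo (pre ++ [t]) ts := by
        simp only [pvGo]; rw [if_neg (fun h => h.1 hp)]
      rw [hgo, ← htail]
    · have hidx : PySem.List.index? (pre ++ t :: ts) t = some pre.length :=
        (PySem.List.index?_eq_some_iff (pre ++ t :: ts) t pre.length).mpr ⟨pre, ts, rfl, rfl, hp⟩
      by_cases hm : (EXACT_ID_PREFIXES.any fun q => PySem.Str.startswith t q) = true
      · rw [show ((((PySem.List.index? (pre ++ t :: ts) t).map (fun n => (n : Int)) ==
              some ((pre.length : Int)))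
              && EXACT_ID_PREFIXES.any (fun pfx => PySem.Str.startswith t pfx)) = true) by
          rw [hidx, hm]; simp]
        rw [if_pos rfl]
        have hgo : pvGo pre (t :: ts) = t :: pvGo (pre ++ [t]) ts := by
          simp only [pvGo]; rw [if_pos ⟨hp, hm⟩]
        rw [hgo, List.map_cons, ← htail]
      · rw [show ((((PySem.List.index? (pre ++ t :: ts) t).map (fun n => (n : Int)) ==
              some ((pre.length : Int)))
              && EXACT_ID_PREFIXES.any (fun pfx => PySem.Str.startswith t pfx)) = false) by
          rw [hidx]; simp only [Bool.and_eq_false_iff]; right; exact Bool.not_eq_true _ ▸ (by simpa using hm)]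
        rw [if_neg (by decide)]
        have hgo : pvGo pre (t :: ts) = pvGo (pre ++ [t]) ts := by
          simp only [pvGo]; rw [if_neg (fun h => hm h.2)]
        rw [hgo, ← htail]

-- ===== VERDICT (by name: the statement is the Claim_ definition above) =====
theorem exact_query_ids_from_tokens_spec : Claim_equal_exact_query_ids_from_tokens := by
  intro tokens _
  unfold Spec_exact_query_ids_from_tokens exact_query_ids_from_tokens unique_preserve_order
  rw [← fused_eq]
  rw [fused_to_go tokens PySem.Set.empty [] []
    (by intro v; simp)]
  unfold exact_query_ids_from_tokens_alt
  rw [List.filter_congr (fun p _ => by rw [get?_pvFirstOcc])]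
  have := enumFilter_to_go tokens []
  simp only [List.nil_append, List.length_nil, Nat.cast_zero] at this
  rw [this, List.nil_append]
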